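-- pv_equiv track=rewrite | github.com/pypi-data/pypi-mirror-125 | packages/pysiclib/pysiclib-0.0.5.tar.gz/pysiclib-0.0.5/setup.py | convert_to_none_any
-- ===== SOURCE A (Python) =====
-- def convert_to_none_any(name):
-- 	current_index = 0
-- 	target_index = 0
-- 	counter = 0
-- 	for char in name:
-- 		if char == '-':
-- 			counter += 1
-- 		if counter == 3:
-- 			target_index = current_index + 1
-- 			break
-- 		current_index += 1
-- 	name = name[:target_index] + 'none-any.whl'
-- 	return name
-- ===== SOURCE B (Python) =====
-- def convert_to_none_any(name):
--     parts = name.split('-')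
--     if len(parts) > 3:
--         return '-'.join(parts[:3]) + '-none-any.whl'
--     return 'none-any.whl'
-- ===== Notes on version B (the rewrite author's own statement) =====
-- stated objective: idiomatic
-- what changed: Replaced A's character-by-character dash-counting loop with break and slice by a split/take-3/join decomposition with an appended suffix.
import Mathlib
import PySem

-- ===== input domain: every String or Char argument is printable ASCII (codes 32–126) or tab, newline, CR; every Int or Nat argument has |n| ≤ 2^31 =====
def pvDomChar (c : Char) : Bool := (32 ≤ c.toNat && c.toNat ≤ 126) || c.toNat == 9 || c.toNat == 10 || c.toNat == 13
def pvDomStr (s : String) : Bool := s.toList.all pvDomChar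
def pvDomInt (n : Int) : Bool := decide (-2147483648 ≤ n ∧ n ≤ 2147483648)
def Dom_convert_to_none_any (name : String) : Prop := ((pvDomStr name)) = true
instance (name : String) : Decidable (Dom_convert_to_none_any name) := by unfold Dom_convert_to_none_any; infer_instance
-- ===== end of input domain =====

-- B replaces A's character-by-character dash-counting loop by an idiomatic split/take/join decomposition; same cost.

-- ===== PORT A =====
-- A's for-loop with break: state (current_index, target_index, counter); returns target_index
def aLoop : List Char → Int → Int → Int → Int
  | [], _, target_index, _ => target_index
  | c :: rest, current_index, target_index, counter =>
    let counter' := if c = '-' then counter + 1 else counter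
    if counter' = 3 then current_index + 1
    else aLoop rest (current_index + 1) target_index counter'

def convert_to_none_any (name : String) : String :=
  let target_index := aLoop name.toList 0 0 0
  String.ofList (PySem.Chars.slice name.toList none (some target_index) ++ "none-any.whl".toList)

-- ===== PORT B =====
def convert_to_none_any_alt (name : String) : String :=
  let parts := PySem.Chars.splitOn name.toList ['-']
  if 3 < parts.length then
    String.ofList (PySem.Chars.join ['-'] (parts.take 3) ++ "-none-any.whl".toList)
  else "none-any.whl"

-- ===== PRECONDITION & SPEC =====
def Spec_convert_to_none_any (name : String) (out : String) : Prop := out = convert_to_none_any_alt name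
instance (name : String) (out : String) : Decidable (Spec_convert_to_none_any name out) := by unfold Spec_convert_to_none_any; infer_instance

-- ===== CLAIM (what is proved, stated in full; the proofs are below) =====
def Claim_equal_convert_to_none_any : Prop := ∀ (name : String), Dom_convert_to_none_any name → Spec_convert_to_none_any name (convert_to_none_any name)

-- ===== LEMMAS AND PROOFS =====

-- simple structural recursion computing Python's s.split('-') (proved equal to PySem.Chars.splitOn below)
def mySplit : List Char → List (List Char)
  | [] => [[]]
  | c :: t => if c = '-' then [] :: mySplit t else (mySplit t).modifyHead (c :: ·)

-- the prefix of l up to and including its r-th dash (none if l has fewer than r dashes)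
def pref : List Char → Nat → Option (List Char)
  | [], _ => none
  | c :: t, r =>
    if c = '-' then
      if r = 1 then some ['-'] else (pref t (r - 1)).map (c :: ·)
    else (pref t r).map (c :: ·)

theorem aLoop_eq_pref : ∀ (l : List Char) (ci : Int) (r : Nat), 1 ≤ r → r ≤ 3 →
    aLoop l ci 0 (3 - (r : Int)) = match pref l r with | some p => ci + p.length | none => 0 := by
  intro l
  induction l with
  | nil => intro ci r h1 h3; simp [aLoop, pref]
  | cons c t ih =>
    intro ci r h1 h3
    by_cases hc : c = '-'
    · interval_cases r
      · simp [aLoop, pref, hc]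
      · have h2 : (3 : Int) - (2:Nat) + 1 ≠ 3 := by norm_num
        have e : (3 : Int) - (2:Nat) + 1 = 3 - ((1:Nat) : Int) := by norm_num
        simp only [aLoop, pref, hc, if_true]
        rw [if_neg (by norm_num), e, ih (ci+1) 1 (by norm_num) (by norm_num)]
        cases hp : pref t 1 with
        | none => simp
        | some p => simp; ring
      · have e : (3 : Int) - (3:Nat) + 1 = 3 - ((2:Nat) : Int) := by norm_num
        simp only [aLoop, pref, hc, if_true]
        rw [if_neg (by norm_num), if_neg (by norm_num), e, ih (ci+1) 2 (by norm_num) (by norm_num)]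
        cases hp : pref t 2 with
        | none => simp
        | some p => simp; ring
    · have hne : (3 : Int) - (r:Nat) ≠ 3 := by omega
      simp only [aLoop, pref, hc, if_false, if_neg hne]
      rw [ih (ci+1) r h1 h3]
      cases hp : pref t r with
        | none => simp
        | some p => simp; ring

theorem pref_prefix : ∀ (l : List Char) (r : Nat) (p : List Char), pref l r = some p → p <+: l := by
  intro l
  induction l with
  | nil => intro r p h; simp [pref] at h
  | cons c t ih =>
    intro r p h
    by_cases hc : c = '-'
    · by_cases hr : r = 1
      · simp [pref, hc, hr] at h
        subst hc
        rw [← h]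
        exact (List.cons_prefix_cons).mpr ⟨rfl, List.nil_prefix⟩
      · subst hc
        simp [pref, hr] at h
        obtain ⟨q, hq, rfl⟩ := h
        exact (List.cons_prefix_cons).mpr ⟨rfl, ih _ _ hq⟩
    · simp [pref, hc] at h
      obtain ⟨q, hq, rfl⟩ := h
      exact (List.cons_prefix_cons).mpr ⟨rfl, ih _ _ hq⟩

theorem mySplit_ne_nil (l : List Char) : mySplit l ≠ [] := by
  induction l with
  | nil => simp [mySplit]
  | cons c t ih =>
    by_cases hc : c = '-'
    · simp [mySplit, hc]
    · simp only [mySplit, hc, if_false]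
      cases h : mySplit t with
      | nil => exact absurd h ih
      | cons a b => simp

theorem go_eq_mySplit : ∀ (fuel : Nat) (l cur : List Char) (acc : List (List Char)), l.length < fuel →
    PySem.Chars.splitOn.go ['-'] fuel l cur acc
      = acc.reverse ++ (mySplit l).modifyHead (cur.reverse ++ ·) := by
  intro fuel
  induction fuel with
  | zero => intro l cur acc h; omega
  | succ fuel ih =>
    intro l cur acc h
    cases l with
    | nil => simp [PySem.Chars.splitOn.go, mySplit]
    | cons c t =>
      by_cases hc : c = '-'
      · have hpre : List.isPrefixOf ['-'] (c :: t) = true := by simp [List.isPrefixOf, hc]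
        rw [PySem.Chars.splitOn.go, if_pos hpre]
        have hd : List.drop ['-'].length (c :: t) = t := rfl
        simp only [List.length_cons] at h
        rw [hd, ih _ _ _ (by omega)]
        cases hm : mySplit t <;> simp [mySplit, hc, hm]
      · have hpre : ¬ List.isPrefixOf ['-'] (c :: t) = true := by
          simp [List.isPrefixOf]; exact fun h => absurd h.symm hc
        rw [PySem.Chars.splitOn.go, if_neg hpre]
        simp only [List.length_cons] at h
        rw [ih _ _ _ (by omega)]
        simp only [mySplit, hc, if_false]
        cases hm : mySplit t with
        | nil => exact absurd hm (mySplit_ne_nil t)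
        | cons a b => simp

theorem splitOn_eq_mySplit (l : List Char) : PySem.Chars.splitOn l ['-'] = mySplit l := by
  rw [PySem.Chars.splitOn, go_eq_mySplit _ _ _ _ (by omega)]
  cases h : mySplit l with
  | nil => exact absurd h (mySplit_ne_nil l)
  | cons a b => simp

theorem pref_eq_join : ∀ (l : List Char) (r : Nat), 1 ≤ r →
    pref l r = if r < (mySplit l).length
      then some (PySem.Chars.join ['-'] ((mySplit l).take r) ++ ['-']) else none := by
  intro l
  induction l with
  | nil => intro r h1; simp [pref, mySplit]; omega
  | cons c t ih =>
    intro r h1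
    obtain ⟨m0, ms, hm⟩ : ∃ m0 ms, mySplit t = m0 :: ms := by
      cases hm : mySplit t with
      | nil => exact absurd hm (mySplit_ne_nil t)
      | cons a b => exact ⟨a, b, rfl⟩
    by_cases hc : c = '-'
    · subst hc
      by_cases hr : r = 1
      · subst hr
        have hlen : 1 < (mySplit ('-' :: t)).length := by
          simp [mySplit, hm]
        simp [pref, mySplit, hm, PySem.Chars.join_singleton]
      · have h2 : 2 ≤ r := by omega
        rw [pref, if_pos rfl, if_neg hr, ih (r-1) (by omega)]
        have hl : (mySplit ('-' :: t)).length = (mySplit t).length + 1 := by simp [mySplit]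
        by_cases hcond : r - 1 < (mySplit t).length
        · have hcond' : r < (mySplit ('-' :: t)).length := by omega
          rw [if_pos hcond, if_pos hcond']
          have htr : (mySplit ('-' :: t)).take r = [] :: (mySplit t).take (r-1) := by
            simp only [mySplit, if_true]
            cases r with
            | zero => omega
            | succ n => simp
          rw [htr, hm]
          obtain ⟨q0, qs, hq⟩ : ∃ q0 qs, (m0 :: ms).take (r-1) = q0 :: qs := by
            cases hq : (m0 :: ms).take (r-1) with
            | nil => rw [hm] at hcond; simp at hq; omega
            | cons a b => exact ⟨a, b, rfl⟩
          rw [hq, PySem.Chars.join_cons_cons]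
          simp
        · have hcond' : ¬ r < (mySplit ('-' :: t)).length := by omega
          rw [if_neg hcond, if_neg hcond']
          simp
    · rw [pref, if_neg hc, ih r h1]
      have hms : mySplit (c :: t) = (c :: m0) :: ms := by
        simp [mySplit, hc, hm]
      have hl : (mySplit (c :: t)).length = (mySplit t).length := by simp [hms, hm]
      by_cases hcond : r < (mySplit t).length
      · have hcond' : r < (mySplit (c :: t)).length := by omega
        rw [if_pos hcond, if_pos hcond', hms, hm]
        cases r with
        | zero => omega
        | succ n =>
          simp only [List.take_succ_cons]
          cases n with
          | zero =>
            simp [PySem.Chars.join_singleton]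
          | succ k =>
            obtain ⟨q0, qs, hq⟩ : ∃ q0 qs, ms.take (k+1) = q0 :: qs := by
              cases hq : ms.take (k+1) with
              | nil =>
                rw [hm] at hcond
                rw [List.take_eq_nil_iff] at hq
                simp at hcond
                rcases hq with h | h
                · omega
                · subst h; simp at hcond
              | cons a b => exact ⟨a, b, rfl⟩
            rw [hq, PySem.Chars.join_cons_cons, PySem.Chars.join_cons_cons]
            simp
      · have hcond' : ¬ r < (mySplit (c :: t)).length := by omega
        rw [if_neg hcond, if_neg hcond']
        simp

-- ===== VERDICT (by name: the statement is the Claim_ definition above) =====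
theorem convert_to_none_any_spec : Claim_equal_convert_to_none_any := by
  intro name _
  unfold Spec_convert_to_none_any convert_to_none_any convert_to_none_any_alt
  simp only [splitOn_eq_mySplit, PySem.Chars.slice_eq_listSlice]
  have hA := aLoop_eq_pref name.toList 0 3 (by norm_num) (le_refl 3)
  have h30 : (3 : Int) - ((3:Nat) : Int) = 0 := by norm_num
  rw [h30] at hA
  have hpj := pref_eq_join name.toList 3 (by norm_num)
  by_cases hcond : 3 < (mySplit name.toList).length
  · rw [if_pos hcond] at hpj
    rw [if_pos hcond]
    have hpre := pref_prefix name.toList 3 _ hpj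
    have htake := (List.prefix_iff_eq_take.mp hpre).symm
    rw [hA, hpj]
    simp only [zero_add]
    rw [PySem.List.slice_to_natCast, htake]
    have hsfx : ("-none-any.whl".toList) = '-' :: "none-any.whl".toList := by decide
    rw [hsfx]
    simp
  · rw [if_neg hcond] at hpj
    rw [if_neg hcond]
    rw [hA, hpj]
    have h0 : PySem.List.slice name.toList none (some (0:Int)) = [] := by
      rw [show ((0:Int)) = ((0:Nat):Int) from rfl, PySem.List.slice_to_natCast]
      simp
    rw [h0]
    simp
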